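-- pv_equiv track=rewrite | github.com/yht0827/coding-test | zuzubibi/2월/2월 3일/⭐⭐유사 칸토어 비트열.py | f
-- ===== SOURCE A (Python) =====
-- def f(n,k):
--     if n ==1:
--         return k if k<=2 else k-1
--     div = 5**(n-1) # 나눌 수
--     mul = 4**(n-1) # 1의 개수
--     loc = k//div # 5개로 나눴을 때 위치 0,1,2,3,4
--
--     if k%div ==0: # 딱 5로 나누어떨어졌을 때
--         loc -= 1
--
--     if loc < 2:
--         return mul*loc + f(n-1, k- loc*div)
--     elif loc ==2:
--         return mul*loc
--     else:
--         return mul*(loc-1) + f(n-1, k-loc*div)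
-- ===== SOURCE B (Python) =====
-- def f(n, k):
--     # digit-scan form: strip base-5 digits of k from the top, weighting each by 4**i;
--     # an exact multiple is answered in closed form (no descent into a full block)
--     res = 0
--     for i in range(n - 1, 0, -1):
--         q, k = divmod(k, 5 ** i)
--         if k == 0:
--             return res + 4 ** i * (q if q < 3 else q - 1)
--         if q == 2:
--             return res + 2 * 4 ** i
--         res += 4 ** i * (q if q < 3 else q - 1)
--     return res + (k if k < 3 else k - 1)
-- ===== Notes on version B (the rewrite author's own statement) =====
-- stated objective: alternative
-- what changed: the recursive descent with its loc-adjustment for exact multiples is replaced by a top-down base-5 digit scan with an accumulator and a weight function, answering the exact-multiple case by a closed form instead of recursing through a full block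
-- outside the precondition, e.g. on f(0, 3): A returns 3.4999999999999676, B returns 2
import Mathlib
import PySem

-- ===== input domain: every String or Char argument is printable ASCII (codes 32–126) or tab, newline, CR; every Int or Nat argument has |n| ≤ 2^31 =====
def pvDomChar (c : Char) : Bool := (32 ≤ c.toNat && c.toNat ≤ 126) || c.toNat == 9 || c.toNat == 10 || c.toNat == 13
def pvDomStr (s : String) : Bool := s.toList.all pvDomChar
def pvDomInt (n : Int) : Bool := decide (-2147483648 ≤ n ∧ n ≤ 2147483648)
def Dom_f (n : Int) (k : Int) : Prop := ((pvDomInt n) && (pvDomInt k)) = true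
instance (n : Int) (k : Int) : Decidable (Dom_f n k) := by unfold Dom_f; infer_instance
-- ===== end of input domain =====

-- B replaces A's recursive descent (with its loc-adjustment on exact multiples) by a
-- top-down base-5 digit scan with an accumulator and a weight function; the
-- exact-multiple case is answered in closed form instead of recursing into a full block.

-- ===== PORT A =====
-- A recurses with n decreasing by 1 down to the base case n == 1; the fuel is n.toNat
-- (exactly the number of steps the Python recursion takes for n ≥ 1).
def fAux : Nat → Int → Int → Int
  | 0, _, k => k  -- unreachable for n ≥ 1 (fuel = n.toNat ≥ 1)
  | fuel + 1, n, k =>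
    if n = 1 then (if k ≤ 2 then k else k - 1)
    else
      let div : Int := 5 ^ (n - 1).toNat
      let mul : Int := 4 ^ (n - 1).toNat
      let loc0 := PySem.Int.floordiv k div
      let loc := if PySem.Int.mod k div = 0 then loc0 - 1 else loc0
      if loc < 2 then mul * loc + fAux fuel (n - 1) (k - loc * div)
      else if loc = 2 then mul * loc
      else mul * (loc - 1) + fAux fuel (n - 1) (k - loc * div)

def f (n : Int) (k : Int) : Int := fAux n.toNat n k

-- ===== PORT B =====
-- B's for-loop over i = n-1, …, 1 with state (k, res); the index i is the recursion
-- argument, so the loop body at index i+1 either returns or continues at index i.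
def fAltGo : Nat → Int → Int → Int
  | 0, k, res => res + (if k < 3 then k else k - 1)
  | i + 1, k, res =>
    let p : Int := 5 ^ (i + 1)
    let q := PySem.Int.floordiv k p
    let r := PySem.Int.mod k p
    if r = 0 then res + 4 ^ (i + 1) * (if q < 3 then q else q - 1)
    else if q = 2 then res + 2 * 4 ^ (i + 1)
    else fAltGo i r (res + 4 ^ (i + 1) * (if q < 3 then q else q - 1))

def f_alt (n : Int) (k : Int) : Int := fAltGo (n - 1).toNat k 0

-- ===== PRECONDITION & SPEC =====
-- Pre_f excludes n ≤ 0, on which the Python A evaluates 5**(n-1) to a float and so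
-- returns a float (not a value of the declared Int type).
def Pre_f (n : Int) (k : Int) : Prop := 1 ≤ n
instance (n : Int) (k : Int) : Decidable (Pre_f n k) := by unfold Pre_f; infer_instance
def pvWitness_f : Int × Int := (3, 7)

def Spec_f (n : Int) (k : Int) (out : Int) : Prop := out = f_alt n k
instance (n : Int) (k : Int) (out : Int) : Decidable (Spec_f n k out) := by unfold Spec_f; infer_instance

-- ===== CLAIM =====
def Claim_equal_f : Prop := ∀ (n : Int) (k : Int), Dom_f n k → Pre_f n k → Spec_f n k (f n k)

-- ===== LEMMAS AND PROOFS =====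

-- zeta-reduced unfolding of A's recursive case (proof-side restatement, by rfl modulo the guard)
theorem fAux_succ (fuel : Nat) (n k : Int) (h : ¬ n = 1) :
    fAux (fuel + 1) n k =
      (if (if PySem.Int.mod k (5 ^ (n - 1).toNat) = 0
            then PySem.Int.floordiv k (5 ^ (n - 1).toNat) - 1
            else PySem.Int.floordiv k (5 ^ (n - 1).toNat)) < 2
       then 4 ^ (n - 1).toNat *
              (if PySem.Int.mod k (5 ^ (n - 1).toNat) = 0
                then PySem.Int.floordiv k (5 ^ (n - 1).toNat) - 1
                else PySem.Int.floordiv k (5 ^ (n - 1).toNat)) +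
            fAux fuel (n - 1)
              (k - (if PySem.Int.mod k (5 ^ (n - 1).toNat) = 0
                     then PySem.Int.floordiv k (5 ^ (n - 1).toNat) - 1
                     else PySem.Int.floordiv k (5 ^ (n - 1).toNat)) * 5 ^ (n - 1).toNat)
       else if (if PySem.Int.mod k (5 ^ (n - 1).toNat) = 0
                 then PySem.Int.floordiv k (5 ^ (n - 1).toNat) - 1
                 else PySem.Int.floordiv k (5 ^ (n - 1).toNat)) = 2
       then 4 ^ (n - 1).toNat *
              (if PySem.Int.mod k (5 ^ (n - 1).toNat) = 0
                then PySem.Int.floordiv k (5 ^ (n - 1).toNat) - 1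
                else PySem.Int.floordiv k (5 ^ (n - 1).toNat))
       else 4 ^ (n - 1).toNat *
              ((if PySem.Int.mod k (5 ^ (n - 1).toNat) = 0
                 then PySem.Int.floordiv k (5 ^ (n - 1).toNat) - 1
                 else PySem.Int.floordiv k (5 ^ (n - 1).toNat)) - 1) +
            fAux fuel (n - 1)
              (k - (if PySem.Int.mod k (5 ^ (n - 1).toNat) = 0
                     then PySem.Int.floordiv k (5 ^ (n - 1).toNat) - 1
                     else PySem.Int.floordiv k (5 ^ (n - 1).toNat)) * 5 ^ (n - 1).toNat)) := by
  rw [fAux, if_neg h]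

-- zeta-reduced unfolding of B's loop body
theorem fAltGo_succ (i : Nat) (k res : Int) :
    fAltGo (i + 1) k res =
      (if PySem.Int.mod k (5 ^ (i + 1)) = 0
       then res + 4 ^ (i + 1) *
              (if PySem.Int.floordiv k (5 ^ (i + 1)) < 3
                then PySem.Int.floordiv k (5 ^ (i + 1))
                else PySem.Int.floordiv k (5 ^ (i + 1)) - 1)
       else if PySem.Int.floordiv k (5 ^ (i + 1)) = 2 then res + 2 * 4 ^ (i + 1)
       else fAltGo i (PySem.Int.mod k (5 ^ (i + 1)))
              (res + 4 ^ (i + 1) *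
                 (if PySem.Int.floordiv k (5 ^ (i + 1)) < 3
                   then PySem.Int.floordiv k (5 ^ (i + 1))
                   else PySem.Int.floordiv k (5 ^ (i + 1)) - 1))) := rfl

-- A full level-(m+1) block is all counted: A's value at k = 5^(m+1) is 4^(m+1).
theorem fAux_full (m : Nat) : fAux (m + 1) ((m : Int) + 1) (5 ^ (m + 1)) = 4 ^ (m + 1) := by
  induction m with
  | zero => decide
  | succ m ih =>
    have hcast : ((m + 1 : Nat) : Int) + 1 = (m : Int) + 2 := by push_cast; ring
    have hne : ¬ ((m : Int) + 2) = 1 := by omega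
    have htn : (((m : Int) + 2) - 1).toNat = m + 1 := by omega
    rw [hcast, fAux_succ _ _ _ hne, htn]
    have hp : (0 : Int) < 5 ^ (m + 1) := by positivity
    have hdvd : PySem.Int.mod ((5:Int) ^ (m + 2)) (5 ^ (m + 1)) = 0 := by
      rw [PySem.Int.mod_eq_zero_iff_dvd]
      exact pow_dvd_pow 5 (by omega)
    have h5 : (5:Int) ^ (m + 2) = 5 * 5 ^ (m + 1) := by rw [pow_succ]; ring
    have hq : PySem.Int.floordiv ((5:Int) ^ (m + 2)) (5 ^ (m + 1)) = 5 := by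
      rw [PySem.Int.floordiv_eq_iff_of_pos hp, h5]
      constructor
      · linarith
      · linarith
    rw [if_pos hdvd, hq]
    rw [if_neg (by omega : ¬ (5:Int) - 1 < 2), if_neg (by omega : ¬ (5:Int) - 1 = 2)]
    have hsub : ((m : Int) + 2) - 1 = (m : Int) + 1 := by ring
    have harg : (5:Int) ^ (m + 2) - (5 - 1) * 5 ^ (m + 1) = 5 ^ (m + 1) := by
      rw [pow_succ]; ring
    rw [hsub, harg, ih, pow_succ]
    ring

-- The digit scan with accumulator res computes res + (A's recursion at level m+1).
theorem fAltGo_eq_fAux (m : Nat) :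
    ∀ (k res : Int), fAltGo m k res = res + fAux (m + 1) ((m : Int) + 1) k := by
  induction m with
  | zero =>
    intro k res
    rw [fAltGo, fAux, if_pos (by norm_num : ((0:Nat):Int) + 1 = 1)]
    by_cases hk : k < 3
    · rw [if_pos hk, if_pos (by omega : k ≤ 2)]
    · rw [if_neg hk, if_neg (by omega : ¬ k ≤ 2)]
  | succ m ih =>
    intro k res
    have hcast : ((m + 1 : Nat) : Int) + 1 = (m : Int) + 2 := by push_cast; ring
    have hne : ¬ ((m : Int) + 2) = 1 := by omega
    have htn : (((m : Int) + 2) - 1).toNat = m + 1 := by omega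
    have hsub : ((m : Int) + 2) - 1 = (m : Int) + 1 := by ring
    rw [hcast, fAltGo_succ, fAux_succ _ _ _ hne, htn, hsub]
    set p : Int := 5 ^ (m + 1) with hpdef
    set q := PySem.Int.floordiv k p with hqdef
    set r := PySem.Int.mod k p with hrdef
    have hkey : q * p + r = k := PySem.Int.floordiv_mul_add_mod k p
    by_cases h0 : r = 0
    · -- exact multiple: A decrements loc and recurses into a full block; B answers directly
      rw [if_pos h0, if_pos h0]
      have harg : k - (q - 1) * p = p := by rw [← hkey, h0]; ring
      have hfull : fAux (m + 1) ((m : Int) + 1) (k - (q - 1) * p) = 4 ^ (m + 1) := by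
        rw [harg, hpdef]; exact fAux_full m
      by_cases h2 : q - 1 < 2
      · rw [if_pos h2, if_pos (by omega : q < 3), hfull]
        ring
      · rw [if_neg h2]
        by_cases h3 : q - 1 = 2
        · rw [if_pos h3, if_neg (by omega : ¬ q < 3), h3]
        · rw [if_neg h3, if_neg (by omega : ¬ q < 3), hfull]
          ring
    · -- r ≠ 0: A keeps loc = q and recurses on the remainder r
      rw [if_neg h0, if_neg h0]
      have harg : k - q * p = r := by rw [← hkey]; ring
      by_cases h2 : q < 2
      · rw [if_neg (by omega : ¬ q = 2), if_pos h2, ih, if_pos (by omega : q < 3), harg]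
        ring
      · rw [if_neg h2]
        by_cases h3 : q = 2
        · rw [if_pos h3, if_pos h3, h3]
          ring
        · rw [if_neg h3, if_neg h3, ih, if_neg (by omega : ¬ q < 3), harg]
          ring

-- ===== VERDICT =====
theorem f_spec : Claim_equal_f := by
  intro n k _ hpre
  unfold Spec_f f f_alt
  have h1 : n.toNat = (n - 1).toNat + 1 := by
    have : (1 : Int) ≤ n := hpre
    omega
  have h2 : (((n - 1).toNat : Int) + 1) = n := by omega
  rw [fAltGo_eq_fAux (n - 1).toNat k 0, h2, h1]
  ring
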